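-- pv_equiv track=rewrite | github.com/azmaite/imabeh | imabeh/general/syncronization.py | _capture_metadata
-- ===== SOURCE A (Python) =====
-- def _capture_metadata(n_frames, dropped_frames=None):
--     """
--     Returns a dictionary as it is usually saved by the seven
--     camera setup in the "capture_metadata.json" file.
--     It assumes that no frames where dropped.
--
--     Parameters
--     ----------
--     n_frames : list of integers
--         Number of frames for each camera.
--     dropped_frames : list of list of integers
--         Frames that were dropped for each camera.
--         Default is None which means no frames where
--         dropped.
--
--     Returns
--     -------
--     capture_info : dict
--         Default metadata dictionary for the seven camera
--         system.
--     """
--     if dropped_frames is None: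
--         dropped_frames = [[] for i in range(len(n_frames))]
--     capture_info = {"Frame Counts": {}}
--     for cam_idx, n in enumerate(n_frames):
--         frames_dict = {}
--         current_frame = 0
--         for i in range(n):
--             while current_frame in dropped_frames[cam_idx]:
--                 current_frame += 1
--             frames_dict[str(i)] = current_frame
--             current_frame += 1
--         capture_info["Frame Counts"][str(cam_idx)] = frames_dict
--     return capture_info
-- ===== SOURCE B (Python) =====
-- def _capture_metadata(n_frames, dropped_frames=None):
--     """Single-pass re-implementation: per camera, sort the distinct dropped
--     frames once and advance a pointer alongside the frame counter instead of
--     re-scanning the dropped list for every candidate frame.  Cameras that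
--     need no frames (n <= 0) skip the sort entirely."""
--     counts = {}
--     for cam_idx, n in enumerate(n_frames):
--         if dropped_frames is None or n <= 0:
--             s = []
--         else:
--             s = sorted(set(dropped_frames[cam_idx]))
--         frames_dict = {}
--         ptr = 0
--         current_frame = 0
--         for i in range(n):
--             while ptr < len(s) and s[ptr] <= current_frame:
--                 if s[ptr] == current_frame:
--                     current_frame += 1
--                 ptr += 1
--             frames_dict[str(i)] = current_frame
--             current_frame += 1
--         counts[str(cam_idx)] = frames_dict
--     return {"Frame Counts": counts}
-- ===== Notes on version B (the rewrite author's own statement) =====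
-- stated objective: alternative
-- what changed: Per camera, B sorts the distinct dropped frames once and advances a pointer in lockstep with the frame counter (a single merge-style pass), instead of A's repeated 'while current_frame in dropped_list' membership scan for every output frame; cameras with n <= 0 skip the sort.
import Mathlib
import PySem

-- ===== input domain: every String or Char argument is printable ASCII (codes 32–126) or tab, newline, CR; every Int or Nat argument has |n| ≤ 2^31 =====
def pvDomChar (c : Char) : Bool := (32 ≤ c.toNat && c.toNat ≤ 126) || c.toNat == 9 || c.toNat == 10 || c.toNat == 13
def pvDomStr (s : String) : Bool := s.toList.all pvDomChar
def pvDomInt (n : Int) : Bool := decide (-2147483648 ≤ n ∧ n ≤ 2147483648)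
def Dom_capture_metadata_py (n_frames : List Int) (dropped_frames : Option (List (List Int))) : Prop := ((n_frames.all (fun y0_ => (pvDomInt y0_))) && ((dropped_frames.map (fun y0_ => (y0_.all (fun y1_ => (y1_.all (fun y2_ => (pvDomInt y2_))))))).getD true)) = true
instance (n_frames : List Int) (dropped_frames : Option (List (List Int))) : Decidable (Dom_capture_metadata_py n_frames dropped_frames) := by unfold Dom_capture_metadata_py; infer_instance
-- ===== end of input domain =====

-- B replaces A's per-frame membership scan of the dropped list by one sort of the distinct
-- dropped frames plus a pointer advanced in lockstep with the frame counter (objective: alternative algorithm).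

-- ===== PORT A =====

-- termination helper for skipA, cited in its decreasing_by
theorem pv_skipA_measure (drop : List Int) (cur : Int) (h : cur ∈ drop) :
    (drop.filter (fun x => decide (cur + 1 ≤ x))).length < (drop.filter (fun x => decide (cur ≤ x))).length := by
  induction drop with
  | nil => cases h
  | cons a t ih =>
    rcases List.mem_cons.mp h with heq | ht
    · subst heq
      have hmono : (t.filter (fun x => decide (cur < x))).length ≤ (t.filter (fun x => decide (cur ≤ x))).length := by
        apply List.Sublist.length_le
        apply List.monotone_filter_right
        intro x hx
        simp only [decide_eq_true_eq] at hx ⊢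
        omega
      have e1 : ¬ (cur + 1 ≤ cur) := by omega
      simp only [List.filter_cons]
      simp [e1]
      omega
    · have iht := ih ht
      by_cases hc2 : cur ≤ a
      · by_cases hc1 : cur + 1 ≤ a
        · simp only [List.filter_cons]
          simp [hc1, hc2] at iht ⊢
          omega
        · simp only [List.filter_cons]
          simp [hc1, hc2] at iht ⊢
          omega
      · have hc1 : ¬ (cur + 1 ≤ a) := by omega
        simp only [List.filter_cons]
        simp [hc1, hc2] at iht ⊢
        omega

-- while current_frame in dropped_frames[cam_idx]: current_frame += 1
def skipA (drop : List Int) (cur : Int) : Int :=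
  if h : cur ∈ drop then skipA drop (cur + 1) else cur
termination_by (drop.filter (fun x => decide (cur ≤ x))).length
decreasing_by exact pv_skipA_measure drop cur h

-- A's inner loop: for i in range(n): skip dropped; frames_dict[str(i)] = current; current += 1
def loopA (drop : List Int) (idxs : List Int) (fd : PySem.Dict String Int) (cur : Int) : PySem.Dict String Int :=
  match idxs with
  | [] => fd
  | i :: rest =>
    let c := skipA drop cur
    loopA drop rest (fd.insert (PySem.Int.toStr i) c) (c + 1)

def capture_metadata_py (n_frames : List Int) (dropped_frames : Option (List (List Int))) : List (String × List (String × List (String × Int))) :=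
  let df := dropped_frames.getD (List.replicate n_frames.length ([] : List Int))
  let frameCounts := (PySem.List.enumerate n_frames).foldl
    (fun (acc : PySem.Dict String (PySem.Dict String Int)) p =>
      acc.insert (PySem.Int.toStr p.1)
        (loopA ((PySem.List.pyGet? df p.1).getD []) (PySem.List.pyRange 0 p.2 1) PySem.Dict.empty 0))
    PySem.Dict.empty
  [("Frame Counts", frameCounts.items.map (fun q => (q.1, q.2.items)))]

-- ===== PORT B =====

-- while ptr < len(s) and s[ptr] <= current: if s[ptr] == current: current += 1; ptr += 1
def skipB (s : List Int) (ptr : Nat) (cur : Int) : Nat × Int :=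
  if h : ptr < s.length then
    if s[ptr] ≤ cur then
      if s[ptr] = cur then skipB s (ptr + 1) (cur + 1)
      else skipB s (ptr + 1) cur
    else (ptr, cur)
  else (ptr, cur)
termination_by s.length - ptr

-- B's inner loop: for i in range(n): advance pointer; frames_dict[str(i)] = current; current += 1
def loopB (s : List Int) (idxs : List Int) (fd : PySem.Dict String Int) (ptr : Nat) (cur : Int) : PySem.Dict String Int :=
  match idxs with
  | [] => fd
  | i :: rest =>
    let pc := skipB s ptr cur
    loopB s rest (fd.insert (PySem.Int.toStr i) pc.2) pc.1 (pc.2 + 1)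

def capture_metadata_py_alt (n_frames : List Int) (dropped_frames : Option (List (List Int))) : List (String × List (String × List (String × Int))) :=
  let frameCounts := (PySem.List.enumerate n_frames).foldl
    (fun (acc : PySem.Dict String (PySem.Dict String Int)) p =>
      let s := match dropped_frames with
        | none => ([] : List Int)
        | some L =>
          if p.2 ≤ 0 then ([] : List Int)
          else PySem.List.sorted (PySem.Set.ofList ((PySem.List.pyGet? L p.1).getD [])) (fun x => x) false
      acc.insert (PySem.Int.toStr p.1)
        (loopB s (PySem.List.pyRange 0 p.2 1) PySem.Dict.empty 0 0))
    PySem.Dict.empty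
  [("Frame Counts", frameCounts.items.map (fun q => (q.1, q.2.items)))]

-- ===== PRECONDITION & SPEC =====
-- Pre_ excludes exactly the inputs on which A raises IndexError: dropped_frames is given and
-- some camera with n > 0 has no entry in it (dropped_frames[cam_idx] is out of range).
def Pre_capture_metadata_py (n_frames : List Int) (dropped_frames : Option (List (List Int))) : Prop :=
  ∀ i < n_frames.length, 0 < n_frames.getD i 0 → i < (dropped_frames.map List.length).getD n_frames.length
instance (n_frames : List Int) (dropped_frames : Option (List (List Int))) : Decidable (Pre_capture_metadata_py n_frames dropped_frames) := by unfold Pre_capture_metadata_py; infer_instance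

def pvWitness_capture_metadata_py : List Int × Option (List (List Int)) := ([3, 2], some [[1], [0, 0, 5]])

def Spec_capture_metadata_py (n_frames : List Int) (dropped_frames : Option (List (List Int))) (out : List (String × List (String × List (String × Int)))) : Prop := out = capture_metadata_py_alt n_frames dropped_frames
instance (n_frames : List Int) (dropped_frames : Option (List (List Int))) (out : List (String × List (String × List (String × Int)))) : Decidable (Spec_capture_metadata_py n_frames dropped_frames out) := by unfold Spec_capture_metadata_py; infer_instance

-- ===== CLAIM (what is proved, stated in full; the proofs are below) =====
def Claim_equal_capture_metadata_py : Prop := ∀ (n_frames : List Int) (dropped_frames : Option (List (List Int))), Dom_capture_metadata_py n_frames dropped_frames → Pre_capture_metadata_py n_frames dropped_frames → Spec_capture_metadata_py n_frames dropped_frames (capture_metadata_py n_frames dropped_frames)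

-- ===== LEMMAS AND PROOFS =====

theorem pv_getD_replicate (k : Nat) (i : Int) :
    ((PySem.List.pyGet? (List.replicate k ([] : List Int)) i).getD []) = [] := by
  cases h : PySem.List.pyGet? (List.replicate k ([] : List Int)) i with
  | none => rfl
  | some v =>
    have hv : v ∈ List.replicate k ([] : List Int) := by
      unfold PySem.List.pyGet? at h
      cases hi : PySem.List.pyIdx? (List.replicate k ([] : List Int)).length i with
      | none => rw [hi] at h; simp at h
      | some a => rw [hi] at h; simp at h; exact List.mem_of_getElem? h
    simp [List.eq_of_mem_replicate hv]

-- the pointer walk of B computes exactly A's membership-scan skip, and maintains its invariant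
theorem pv_skip_eq (d s : List Int) (hs : s.Pairwise (· < ·)) (hmem : ∀ x, x ∈ s ↔ x ∈ d) :
    ∀ (k : Nat) (ptr : Nat) (cur : Int), s.length - ptr ≤ k → (∀ x ∈ s.take ptr, x < cur) →
      (skipB s ptr cur).2 = skipA d cur ∧
      (∀ x ∈ s.take (skipB s ptr cur).1, x < (skipB s ptr cur).2 + 1) := by
  intro k
  induction k with
  | zero =>
    intro ptr cur hk hinv
    have hge : s.length ≤ ptr := by omega
    rw [skipB]
    have hnlt : ¬ ptr < s.length := by omega
    simp only [hnlt, dite_false]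
    constructor
    · rw [skipA]
      have hnm : cur ∉ d := by
        intro hd
        have : cur ∈ s.take ptr := by
          rw [List.take_of_length_le hge]; exact (hmem cur).mpr hd
        exact absurd (hinv cur this) (lt_irrefl cur)
      simp [hnm]
    · intro x hx
      exact lt_trans (hinv x hx) (by omega)
  | succ n ih =>
    intro ptr cur hk hinv
    by_cases hlt : ptr < s.length
    · by_cases hle : s[ptr] ≤ cur
      · by_cases heq : s[ptr] = cur
        · -- dropped frame hit: both skip cur
          have hstep : skipB s ptr cur = skipB s (ptr + 1) (cur + 1) := by
            rw [skipB]; simp [hlt, heq]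
          have hinv' : ∀ x ∈ s.take (ptr + 1), x < cur + 1 := by
            intro x hx
            rw [List.take_add_one] at hx
            rcases List.mem_append.mp hx with h1 | h2
            · exact lt_trans (hinv x h1) (by omega)
            · have : x = s[ptr] := by
                rw [List.getElem?_eq_getElem hlt] at h2; simpa using h2
              omega
          have hA : skipA d cur = skipA d (cur + 1) := by
            rw [skipA]
            have : cur ∈ d := (hmem cur).mp (heq ▸ List.getElem_mem hlt)
            simp [this]
          rw [hstep, hA]
          exact ih (ptr + 1) (cur + 1) (by omega) hinv'
        · -- stale pointer element (< cur): advance pointer only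
          have hstep : skipB s ptr cur = skipB s (ptr + 1) cur := by
            rw [skipB]; simp [hlt, hle, heq]
          have hinv' : ∀ x ∈ s.take (ptr + 1), x < cur := by
            intro x hx
            rw [List.take_add_one] at hx
            rcases List.mem_append.mp hx with h1 | h2
            · exact hinv x h1
            · have hx' : x = s[ptr] := by
                rw [List.getElem?_eq_getElem hlt] at h2; simpa using h2
              have : s[ptr] ≠ cur := heq
              omega
          rw [hstep]
          exact ih (ptr + 1) cur (by omega) hinv'
      · -- s[ptr] > cur: loop exits, cur is not dropped
        have hstep : skipB s ptr cur = (ptr, cur) := by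
          rw [skipB]; simp [hlt, hle]
        rw [hstep]
        have hpw := List.pairwise_iff_getElem.mp hs
        constructor
        · rw [skipA]
          have hnm : cur ∉ d := by
            intro hd
            obtain ⟨j, hj, hjv⟩ := List.mem_iff_getElem.mp ((hmem cur).mpr hd)
            rcases lt_trichotomy j ptr with hjp | rfl | hjp
            · have : cur ∈ s.take ptr := by
                apply List.mem_take_iff_getElem.mpr
                exact ⟨j, by omega, by simp [hjv]⟩
              exact absurd (hinv cur this) (lt_irrefl cur)
            · exact hle (le_of_eq hjv)
            · have := hpw ptr j hlt hj hjp
              omega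
          simp [hnm]
        · intro x hx
          exact lt_trans (hinv x hx) (by omega)
    · rw [skipB]
      simp only [hlt, dite_false]
      constructor
      · rw [skipA]
        have hnm : cur ∉ d := by
          intro hd
          have : cur ∈ s.take ptr := by
            rw [List.take_of_length_le (by omega)]; exact (hmem cur).mpr hd
          exact absurd (hinv cur this) (lt_irrefl cur)
        simp [hnm]
      · intro x hx
        exact lt_trans (hinv x hx) (by omega)

theorem pv_loop_eq (d s : List Int) (hs : s.Pairwise (· < ·)) (hmem : ∀ x, x ∈ s ↔ x ∈ d) :
    ∀ (idxs : List Int) (fd : PySem.Dict String Int) (ptr : Nat) (cur : Int),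
      (∀ x ∈ s.take ptr, x < cur) → loopA d idxs fd cur = loopB s idxs fd ptr cur := by
  intro idxs
  induction idxs with
  | nil => intro fd ptr cur _; rfl
  | cons i rest ih =>
    intro fd ptr cur hinv
    obtain ⟨h1, h2⟩ := pv_skip_eq d s hs hmem (s.length - ptr) ptr cur le_rfl hinv
    simp only [loopA, loopB]
    rw [← h1]
    exact ih _ _ _ h2

theorem pv_sorted_set_mem (d : List Int) (x : Int) :
    x ∈ PySem.List.sorted (PySem.Set.ofList d) (fun x => x) false ↔ x ∈ d := by
  rw [PySem.List.mem_sorted]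
  exact PySem.Set.mem_ofList d x

-- ===== VERDICT (by name: the statement is the Claim_ definition above) =====
theorem capture_metadata_py_spec : Claim_equal_capture_metadata_py := by
  unfold Claim_equal_capture_metadata_py Spec_capture_metadata_py
  intro nf df _ _
  unfold capture_metadata_py capture_metadata_py_alt
  cases df with
  | none =>
    simp only [Option.getD_none]
    have hfun : (fun (acc : PySem.Dict String (PySem.Dict String Int)) (p : Int × Int) =>
        acc.insert (PySem.Int.toStr p.1)
          (loopA ((PySem.List.pyGet? (List.replicate nf.length ([] : List Int)) p.1).getD [])
            (PySem.List.pyRange 0 p.2 1) PySem.Dict.empty 0))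
        = (fun (acc : PySem.Dict String (PySem.Dict String Int)) (p : Int × Int) =>
        acc.insert (PySem.Int.toStr p.1)
          (loopB [] (PySem.List.pyRange 0 p.2 1) PySem.Dict.empty 0 0)) := by
      funext acc p
      rw [pv_getD_replicate]
      rw [pv_loop_eq ([] : List Int) ([] : List Int) List.Pairwise.nil (fun x => Iff.rfl) _ _ 0 0 (by simp)]
    rw [hfun]
  | some L =>
    simp only [Option.getD_some]
    have hfun : (fun (acc : PySem.Dict String (PySem.Dict String Int)) (p : Int × Int) =>
        acc.insert (PySem.Int.toStr p.1)
          (loopA ((PySem.List.pyGet? L p.1).getD [])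
            (PySem.List.pyRange 0 p.2 1) PySem.Dict.empty 0))
        = (fun (acc : PySem.Dict String (PySem.Dict String Int)) (p : Int × Int) =>
        acc.insert (PySem.Int.toStr p.1)
          (loopB (if p.2 ≤ 0 then ([] : List Int)
              else PySem.List.sorted (PySem.Set.ofList ((PySem.List.pyGet? L p.1).getD [])) (fun x => x) false)
            (PySem.List.pyRange 0 p.2 1) PySem.Dict.empty 0 0)) := by
      funext acc p
      by_cases hn : p.2 ≤ 0
      · rw [if_pos hn, PySem.List.pyRange_one_eq_nil hn]
        rfl
      · rw [if_neg hn]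
        rw [pv_loop_eq ((PySem.List.pyGet? L p.1).getD [])
              (PySem.List.sorted (PySem.Set.ofList ((PySem.List.pyGet? L p.1).getD [])) (fun x => x) false)
              (PySem.List.sorted_ofList_pairwise_lt _)
              (pv_sorted_set_mem _) _ _ 0 0 (by simp)]
    rw [hfun]
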